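-- pv_equiv track=rewrite | github.com/tchapeaux/advent-of-code2020 | day14_a_b.py | getAllReplacements
-- ===== SOURCE A (Python) =====
-- def getAllReplacements(addrWithFloating):
--     # Take a string with X's in it
--     # Return all possible replacements of the X by 1 and 0
--     if not "X" in addrWithFloating:
--         yield addrWithFloating
--     else:
--         firstXIdx = addrWithFloating.index("X")
--         beforeFirstX = addrWithFloating[:firstXIdx]
--         afterFirstX = addrWithFloating[firstXIdx + 1 :]
--         for possibleAfters in getAllReplacements(afterFirstX):
--             yield beforeFirstX + "0" + possibleAfters
--             yield beforeFirstX + "1" + possibleAfters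
-- ===== SOURCE B (Python) =====
-- def getAllReplacements(addrWithFloating):
--     # Take a string with X's in it
--     # Return all possible replacements of the X by 1 and 0
--     # Counting approach: enumerate n < 2**k and substitute the bits of n
--     # (leftmost X = least-significant bit) in a single left-to-right pass.
--     k = len([ch for ch in addrWithFloating if ch == "X"])
--     for n in range(2 ** k):
--         out = []
--         m = n
--         for ch in addrWithFloating:
--             if ch == "X":
--                 out.append(str(m & 1))
--                 m >>= 1
--             else:
--                 out.append(ch)
--         yield "".join(out)
-- ===== Notes on version B (the rewrite author's own statement) =====
-- stated objective: alternative
-- what changed: Replaces A's recursive generator (split at the first X, double the suffix results) with an iterative binary-counting enumeration: count the X's once, then for each n < 2**k substitute the bits of n (leftmost X = least-significant bit) in one left-to-right pass.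
import Mathlib
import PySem

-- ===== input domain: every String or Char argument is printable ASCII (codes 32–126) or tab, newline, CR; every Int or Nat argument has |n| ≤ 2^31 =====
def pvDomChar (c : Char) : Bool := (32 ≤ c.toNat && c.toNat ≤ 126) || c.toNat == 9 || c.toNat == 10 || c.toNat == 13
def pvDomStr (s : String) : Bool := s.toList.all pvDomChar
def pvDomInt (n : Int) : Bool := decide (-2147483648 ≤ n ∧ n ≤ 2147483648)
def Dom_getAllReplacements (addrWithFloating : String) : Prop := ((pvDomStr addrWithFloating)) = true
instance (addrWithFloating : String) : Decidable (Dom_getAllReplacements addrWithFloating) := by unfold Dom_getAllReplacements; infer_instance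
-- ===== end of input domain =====

-- B replaces A's recursive split-at-first-X generator by an iterative binary-counting
-- enumeration (n < 2^k, substitute the bits of n, leftmost X = LSB); alternative, same cost.


-- ===== PORT A =====
-- A, on the char list: `"X" in s` is Chars.isIn; `s.index("X")` is Chars.find (equal to
-- index here because the branch guarantees "X" occurs); the slices are Chars.slice.
def getARec (s : List Char) : List (List Char) :=
  if _h : PySem.Chars.isIn ['X'] s = false then [s]
  else
    let firstXIdx := PySem.Chars.find s ['X']
    let beforeFirstX := PySem.Chars.slice s none (some firstXIdx)
    let afterFirstX := PySem.Chars.slice s (some (firstXIdx + 1)) none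
    (getARec afterFirstX).flatMap
      (fun p => [beforeFirstX ++ ['0'] ++ p, beforeFirstX ++ ['1'] ++ p])
termination_by s.length
decreasing_by
  have hin : PySem.Chars.isIn ['X'] s = true := by
    cases hx : PySem.Chars.isIn ['X'] s with
    | false => exact absurd hx _h
    | true => rfl
  have hmem : 'X' ∈ s := (List.singleton_infix_iff 'X' s).mp
    ((PySem.Chars.isIn_iff_infix _ _).mp hin)
  have hnn : 0 ≤ PySem.Chars.find s ['X'] := by
    rw [PySem.Chars.find_nonneg_iff]
    exact (List.singleton_infix_iff 'X' s).mpr hmem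
  have hslice : PySem.Chars.slice s (some (PySem.Chars.find s ['X'] + 1)) none
      = List.drop (PySem.Chars.find s ['X'] + 1).toNat s := by
    rw [PySem.Chars.slice_eq_listSlice, PySem.List.slice_from _ (by omega)]
  simp only [hslice, List.length_drop]
  have : s ≠ [] := List.ne_nil_of_mem hmem
  have : 0 < s.length := List.length_pos_of_ne_nil this
  omega

def getAllReplacements (addrWithFloating : String) : List String :=
  (getARec addrWithFloating.toList).map (fun cs => String.ofList cs)

-- ===== PORT B =====
-- the inner for-loop of Source B: one left-to-right pass, each 'X' consumes the next bit of m
def buildAlt (s : List Char) (m : Int) : List Char :=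
  match s with
  | [] => []
  | c :: cs =>
      if c = 'X' then
        PySem.Int.toChars (PySem.Int.band m 1) ++ buildAlt cs (m >>> 1)
      else c :: buildAlt cs m

def getAllReplacements_alt (addrWithFloating : String) : List String :=
  let k := (addrWithFloating.toList.filter (fun c => c = 'X')).length
  (PySem.List.pyRange 0 ((2 : Int) ^ k) 1).map
    (fun n => String.ofList (buildAlt addrWithFloating.toList n))

-- ===== PRECONDITION & SPEC =====
def Spec_getAllReplacements (addrWithFloating : String) (out : List String) : Prop := out = getAllReplacements_alt addrWithFloating
instance (addrWithFloating : String) (out : List String) : Decidable (Spec_getAllReplacements addrWithFloating out) := by unfold Spec_getAllReplacements; infer_instance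

-- ===== CLAIM (what is proved, stated in full; the proofs are below) =====
def Claim_equal_getAllReplacements : Prop := ∀ (addrWithFloating : String), Dom_getAllReplacements addrWithFloating → Spec_getAllReplacements addrWithFloating (getAllReplacements addrWithFloating)

-- ===== LEMMAS AND PROOFS =====

theorem singleton_prefix_iff_head {α : Type} (x : α) (l : List α) :
    [x] <+: l ↔ l.head? = some x := by
  cases l with
  | nil => simp
  | cons a t =>
      constructor
      · rintro ⟨u, hu⟩
        simp at hu
        simp [hu.1]
      · intro h
        simp at h
        exact ⟨t, by simp [h]⟩

-- structure of s at the first occurrence of 'X'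
theorem find_split (s : List Char) (h : PySem.Chars.isIn ['X'] s = true) :
    0 ≤ PySem.Chars.find s ['X'] ∧
    s = s.take (PySem.Chars.find s ['X']).toNat ++
        'X' :: s.drop ((PySem.Chars.find s ['X']).toNat + 1) ∧
    'X' ∉ s.take (PySem.Chars.find s ['X']).toNat := by
  have hinf := (PySem.Chars.isIn_iff_infix _ _).mp h
  have hnn : 0 ≤ PySem.Chars.find s ['X'] :=
    (PySem.Chars.find_nonneg_iff _ _).mpr hinf
  obtain ⟨hpre, hmin⟩ := PySem.Chars.find_spec hnn
  set i := (PySem.Chars.find s ['X']).toNat with hi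
  have hhead : (s.drop i).head? = some 'X' := (singleton_prefix_iff_head _ _).mp hpre
  have hgi : s[i]? = some 'X' := by rw [← List.head?_drop]; exact hhead
  have hilt : i < s.length := by
    by_contra hge
    rw [List.getElem?_eq_none (by omega)] at hgi
    simp at hgi
  refine ⟨hnn, ?_, ?_⟩
  · conv_lhs => rw [← List.take_append_drop i s]
    congr 1
    rw [← List.tail_drop]
    cases hd : s.drop i with
    | nil => simp [hd] at hhead
    | cons a t => simp [hd] at hhead ⊢; exact hhead
  · intro hmem
    obtain ⟨j, hj, hjx⟩ := List.getElem_of_mem hmem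
    have hjlen : j < i := by
      simp [List.length_take] at hj; omega
    have : ¬ ['X'] <+: s.drop j := hmin j hjlen
    apply this
    rw [singleton_prefix_iff_head, List.head?_drop]
    rw [List.getElem_take] at hjx
    rw [List.getElem?_eq_getElem (by omega)]
    exact congrArg some hjx

-- the inner pass copies a stretch with no X and substitutes a bit at an X
theorem buildAlt_no_X (s : List Char) (m : Int) (h : 'X' ∉ s) : buildAlt s m = s := by
  induction s with
  | nil => rfl
  | cons c cs ih =>
      rw [buildAlt]
      have hc : ¬ c = 'X' := fun hc => h (by simp [hc])
      simp only [if_neg hc]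
      rw [ih (fun hm => h (List.mem_cons_of_mem _ hm))]

theorem buildAlt_split (b a : List Char) (m : Int) (hb : 'X' ∉ b) :
    buildAlt (b ++ 'X' :: a) m
      = b ++ PySem.Int.toChars (PySem.Int.band m 1) ++ buildAlt a (m >>> 1) := by
  induction b with
  | nil => simp [buildAlt]
  | cons c cs ih =>
      have hc : ¬ c = 'X' := fun hc => hb (by simp [hc])
      rw [List.cons_append, buildAlt]
      simp only [if_neg hc]
      rw [ih (fun hm => hb (List.mem_cons_of_mem _ hm))]
      simp

-- enumerating range(2N) pairs even/odd
theorem range_double {α : Type} (N : Nat) (f : Nat → α) :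
    (List.range (2 * N)).map f
      = (List.range N).flatMap (fun m => [f (2 * m), f (2 * m + 1)]) := by
  induction N with
  | zero => rfl
  | succ n ih =>
      have h2 : 2 * (n + 1) = (2 * n + 1) + 1 := by ring
      rw [h2, List.range_succ, List.range_succ, List.range_succ]
      simp only [List.map_append, List.flatMap_append, ih]
      simp

theorem bit_even (a : Nat) : PySem.Int.toChars (PySem.Int.band ((2 * a : Nat) : Int) 1) = ['0'] := by
  have : ((1:Int)) = ((1:Nat) : Int) := rfl
  rw [this, PySem.Int.band_natCast]
  have : 2 * a &&& 1 = 0 := by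
    rw [Nat.and_one_is_mod]; omega
  rw [this]; rfl

theorem bit_odd (a : Nat) : PySem.Int.toChars (PySem.Int.band ((2 * a + 1 : Nat) : Int) 1) = ['1'] := by
  have : ((1:Int)) = ((1:Nat) : Int) := rfl
  rw [this, PySem.Int.band_natCast]
  have : (2 * a + 1) &&& 1 = 1 := by
    rw [Nat.and_one_is_mod]; omega
  rw [this]; rfl

theorem shift_even (a : Nat) : (((2 * a : Nat) : Int) >>> (1:Int)) = ((a : Nat) : Int) := by
  show (((2 * a) >>> 1 : Nat) : Int) = ((a : Nat) : Int)
  congr 1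
  omega

theorem shift_odd (a : Nat) : (((2 * a + 1 : Nat) : Int) >>> (1:Int)) = ((a : Nat) : Int) := by
  show (((2 * a + 1) >>> 1 : Nat) : Int) = ((a : Nat) : Int)
  congr 1
  omega

theorem getARec_neg (s : List Char) (h : PySem.Chars.isIn ['X'] s = false) :
    getARec s = [s] := by
  rw [getARec, dif_pos h]

theorem getARec_pos (s : List Char) (h : ¬ PySem.Chars.isIn ['X'] s = false) :
    getARec s
      = (getARec (PySem.Chars.slice s (some (PySem.Chars.find s ['X'] + 1)) none)).flatMap
          (fun p => [PySem.Chars.slice s none (some (PySem.Chars.find s ['X'])) ++ ['0'] ++ p,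
                     PySem.Chars.slice s none (some (PySem.Chars.find s ['X'])) ++ ['1'] ++ p]) := by
  rw [getARec, dif_neg h]

-- main equivalence on char lists
theorem getARec_eq (s : List Char) :
    getARec s = (List.range (2 ^ (s.filter (fun c => c = 'X')).length)).map
      (fun j => buildAlt s ((j : Nat) : Int)) := by
  suffices H : ∀ n : Nat, ∀ s : List Char, s.length = n →
      getARec s = (List.range (2 ^ (s.filter (fun c => c = 'X')).length)).map
        (fun j => buildAlt s ((j : Nat) : Int)) from H s.length s rfl
  intro n
  induction n using Nat.strong_induction_on with
  | _ n ih =>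
    intro s hs
    by_cases hin : PySem.Chars.isIn ['X'] s = false
    · -- no X: k = 0, one output, the string itself
      rw [getARec_neg s hin]
      have hni : ¬ ['X'] <:+: s := (PySem.Chars.isIn_eq_false_iff _ _).mp hin
      have hnm : 'X' ∉ s := fun hm => hni ((List.singleton_infix_iff _ _).mpr hm)
      have hf : s.filter (fun c => c = 'X') = [] := by
        rw [List.filter_eq_nil_iff]
        intro c hc
        simp only [decide_eq_true_eq]
        exact fun hcx => hnm (hcx ▸ hc)
      rw [hf]
      simp [buildAlt_no_X s 0 hnm]
    · rw [getARec_pos s hin]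
      have hin' : PySem.Chars.isIn ['X'] s = true := by
        cases hx : PySem.Chars.isIn ['X'] s with
        | false => exact absurd hx hin
        | true => rfl
      obtain ⟨hnn, hsplit, hnob⟩ := find_split s hin'
      set i := (PySem.Chars.find s ['X']).toNat with hidef
      set b := s.take i with hb
      set a := s.drop (i + 1) with ha
      have hbefore : PySem.Chars.slice s none (some (PySem.Chars.find s ['X'])) = b := by
        rw [PySem.Chars.slice_eq_listSlice, PySem.List.slice_to _ hnn]
      have hafter : PySem.Chars.slice s (some (PySem.Chars.find s ['X'] + 1)) none = a := by
        rw [PySem.Chars.slice_eq_listSlice, PySem.List.slice_from _ (by omega)]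
        rw [ha]
        congr 1
        omega
      have hlen : a.length < n := by
        have : s.length = b.length + 1 + a.length := by
          conv_lhs => rw [hsplit]
          simp
          omega
        omega
      have iha := ih a.length hlen a rfl
      have hfilt : (s.filter (fun c => c = 'X')).length
          = (a.filter (fun c => c = 'X')).length + 1 := by
        conv_lhs => rw [hsplit]
        rw [List.filter_append]
        have hfb : b.filter (fun c => c = 'X') = [] := by
          rw [List.filter_eq_nil_iff]
          intro c hc
          simp only [decide_eq_true_eq]
          exact fun hcx => hnob (hcx ▸ hc)
        simp [hfb]
      rw [hbefore, hafter, iha, hfilt]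
      rw [pow_succ, Nat.mul_comm, range_double]
      rw [List.flatMap_map]
      congr 1
      funext m
      have he : buildAlt s (((2 * m : Nat) : Nat) : Int)
          = b ++ ['0'] ++ buildAlt a ((m : Nat) : Int) := by
        conv_lhs => rw [hsplit]
        rw [buildAlt_split _ _ _ hnob, bit_even, shift_even]
      have ho : buildAlt s (((2 * m + 1 : Nat) : Nat) : Int)
          = b ++ ['1'] ++ buildAlt a ((m : Nat) : Int) := by
        conv_lhs => rw [hsplit]
        rw [buildAlt_split _ _ _ hnob, bit_odd, shift_odd]
      rw [he, ho]

-- ===== VERDICT (by name: the statement is the Claim_ definition above) =====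
theorem getAllReplacements_spec : Claim_equal_getAllReplacements := by
  intro s _
  show (getARec s.toList).map (fun cs => String.ofList cs)
      = (PySem.List.pyRange 0 ((2 : Int) ^ (s.toList.filter (fun c => c = 'X')).length) 1).map
          (fun n => String.ofList (buildAlt s.toList n))
  have hcast : ((2 : Int) ^ (s.toList.filter (fun c => c = 'X')).length)
      = (((2 ^ (s.toList.filter (fun c => c = 'X')).length : Nat)) : Int) := by
    push_cast; ring
  rw [getARec_eq, hcast, PySem.List.pyRange_zero_nat, List.map_map, List.map_map]
  rfl
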